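-- pv_equiv track=rewrite | github.com/AtAleDu/HomeWorkPython | Infa7/5.py | insert_books
-- ===== SOURCE A (Python) =====
-- def hash_by_title_length(book_title):
--     return len(book_title) % 1000  # Ограничим хеш до 3 знаков
--
-- def insert_books(books):
--     hash_table = {}
--     for book in books:
--         hash_value = hash_by_title_length(book)
--         if hash_value not in hash_table:
--             hash_table[hash_value] = [book]
--         else:
--             hash_table[hash_value].append(book)
--     return hash_table
-- ===== SOURCE B (Python) =====
-- def insert_books(books):
--     # Two-pass grouping: distinct keys in first-occurrence order, then one
--     # filter pass per key. Same dict as A's hash-insert/append loop.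
--     keys = list(dict.fromkeys(len(b) % 1000 for b in books))
--     return {k: [b for b in books if len(b) % 1000 == k] for k in keys}
-- ===== Notes on version B (the rewrite author's own statement) =====
-- stated objective: alternative
-- what changed: Replaced the single hash-insert/append mutation loop with a two-pass decomposition: dedup of the key sequence (dict.fromkeys) gives the key order, then each group is produced by a filter comprehension over the whole input.
import Mathlib
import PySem

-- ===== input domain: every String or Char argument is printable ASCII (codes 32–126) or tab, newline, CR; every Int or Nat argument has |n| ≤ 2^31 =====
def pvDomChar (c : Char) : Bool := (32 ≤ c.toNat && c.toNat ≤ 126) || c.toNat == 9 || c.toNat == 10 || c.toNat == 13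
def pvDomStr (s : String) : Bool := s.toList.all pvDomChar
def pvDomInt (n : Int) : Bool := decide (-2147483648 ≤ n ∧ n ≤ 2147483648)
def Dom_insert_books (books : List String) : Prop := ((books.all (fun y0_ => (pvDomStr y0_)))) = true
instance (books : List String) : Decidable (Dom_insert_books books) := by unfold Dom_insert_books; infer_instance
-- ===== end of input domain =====

-- B groups by a dedup-of-keys pass followed by one filter per key instead of A's
-- hash-insert/append loop; objective: alternative decomposition, same result.

-- ===== PORT A =====
-- hash_by_title_length(book) = len(book) % 1000
def hash_by_title_length (book_title : String) : Int :=
  PySem.Int.mod (PySem.Str.len book_title) 1000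

def insert_books (books : List String) : List (Int × List String) :=
  (books.foldl (fun hash_table book =>
      let hash_value := hash_by_title_length book
      if hash_table.contains hash_value = false then
        hash_table.insert hash_value [book]
      else
        -- hash_table[hash_value].append(book): read the list, append, store back in place
        hash_table.insert hash_value (hash_table.getD hash_value [] ++ [book]))
    (PySem.Dict.empty : PySem.Dict Int (List String))).items

-- ===== PORT B =====
def insert_books_alt (books : List String) : List (Int × List String) :=
  let keys := PySem.List.dedup (books.map (fun b => PySem.Int.mod (PySem.Str.len b) 1000))
  keys.map (fun k => (k, books.filter (fun b => PySem.Int.mod (PySem.Str.len b) 1000 == k)))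

-- ===== PRECONDITION & SPEC =====
def Spec_insert_books (books : List String) (out : List (Int × List String)) : Prop := out = insert_books_alt books
instance (books : List String) (out : List (Int × List String)) : Decidable (Spec_insert_books books out) := by unfold Spec_insert_books; infer_instance

-- ===== CLAIM (what is proved, stated in full; the proofs are below) =====
def Claim_equal_insert_books : Prop := ∀ (books : List String), Dom_insert_books books → Spec_insert_books books (insert_books books)

-- ===== LEMMAS AND PROOFS =====

-- A's branch on membership is, in both cases, the modify loop (absent key: getD gives []).
theorem insert_books_fold_eq_modify (books : List String) :
    (books.foldl (fun hash_table book =>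
      let hash_value := hash_by_title_length book
      if hash_table.contains hash_value = false then
        hash_table.insert hash_value [book]
      else
        hash_table.insert hash_value (hash_table.getD hash_value [] ++ [book]))
    (PySem.Dict.empty : PySem.Dict Int (List String)))
    = (books.map (fun b => (hash_by_title_length b, b))).foldl
        (fun d p => d.modify p.1 [] (· ++ [p.2])) PySem.Dict.empty := by
  rw [List.foldl_map]
  apply PySem.List.foldl_congr_mem
  intro d b _
  by_cases h : d.contains (hash_by_title_length b) = false
  · simp only [h, if_true]
    have h0 : d.getD (hash_by_title_length b) [] = [] :=
      PySem.Dict.getD_of_not_contains d [] h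
    simp [PySem.Dict.modify, PySem.Dict.insert, PySem.Dict.getD] at h0 ⊢
    simp [h0]
  · simp only [h]
    simp [PySem.Dict.modify, PySem.Dict.insert, PySem.Dict.getD]

-- ===== VERDICT (by name: the statement is the Claim_ definition above) =====
theorem insert_books_spec : Claim_equal_insert_books := by
  intro books _
  unfold Spec_insert_books insert_books insert_books_alt
  rw [insert_books_fold_eq_modify]
  set key : String → Int := fun b => PySem.Int.mod (PySem.Str.len b) 1000 with hkey
  have hnd : ((books.map (fun b => (hash_by_title_length b, b))).foldl
      (fun d p => d.modify p.1 [] (· ++ [p.2])) PySem.Dict.empty).keys.Nodup := by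
    have := PySem.Dict.nodup_keys_foldl_modify_key
      (books.map (fun b => (hash_by_title_length b, b))) (fun p => p.1)
      [] (fun _ p => (· ++ [p.2])) (PySem.Dict.empty : PySem.Dict Int (List String)) (by simp)
    simpa using this
  rw [PySem.Dict.items_eq_map_keys _ hnd []]
  have hkeys : ((books.map (fun b => (hash_by_title_length b, b))).foldl
      (fun d p => d.modify p.1 [] (· ++ [p.2])) PySem.Dict.empty).keys
      = PySem.List.dedup (books.map key) := by
    have := PySem.Dict.keys_foldl_modify_key
      (books.map (fun b => (hash_by_title_length b, b))) (fun p => p.1)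
      [] (fun _ p => (· ++ [p.2])) (PySem.Dict.empty : PySem.Dict Int (List String))
    rw [this]
    simp [PySem.Set.update, PySem.Set.ofList, PySem.Dict.empty, List.map_map,
      Function.comp_def, hash_by_title_length, hkey, PySem.List.dedup_eq_ofList]
  rw [hkeys]
  apply List.map_congr_left
  intro k _
  have hget := PySem.Dict.getD_foldl_modify_append
    (books.map (fun b => (hash_by_title_length b, b)))
    (PySem.Dict.empty : PySem.Dict Int (List String)) k
  rw [hget]
  simp [List.filter_map, Function.comp_def, hash_by_title_length]
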